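-- pv_equiv track=rewrite | github.com/theRuchiChauhan/biomarker-prediction-breast-cancer | classification/learner.py | get_slide_dict
-- ===== SOURCE A (Python) =====
-- from collections import namedtuple, defaultdict
--
-- def get_slide_dict(patch_list, slide_list):
--     slide_dict = defaultdict(list)
--     for slide_name in slide_list:
--         for patch_name in patch_list:
--             patch_slide_name = patch_name.split('/')[0]
--             # patch_slide_name = patch_name.split('/')[1]
--             if patch_slide_name == slide_name:
--                 slide_dict[slide_name].append(patch_name)
--     return slide_dict
-- ===== SOURCE B (Python) =====
-- def get_slide_dict(patch_list, slide_list):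
--     groups = {}
--     for patch_name in patch_list:
--         groups.setdefault(patch_name.split('/')[0], []).append(patch_name)
--     out = {}
--     for slide_name in slide_list:
--         ps = groups.get(slide_name, [])
--         if ps:
--             out.setdefault(slide_name, []).extend(ps)
--     return out
-- ===== Notes on version B (the rewrite author's own statement) =====
-- stated objective: faster
-- what changed: Instead of rescanning the whole patch_list once per slide name, B groups the patches by their '/'-prefix into a dict in one pass and then walks slide_list once, looking each slide up in that dict.
import Mathlib
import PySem

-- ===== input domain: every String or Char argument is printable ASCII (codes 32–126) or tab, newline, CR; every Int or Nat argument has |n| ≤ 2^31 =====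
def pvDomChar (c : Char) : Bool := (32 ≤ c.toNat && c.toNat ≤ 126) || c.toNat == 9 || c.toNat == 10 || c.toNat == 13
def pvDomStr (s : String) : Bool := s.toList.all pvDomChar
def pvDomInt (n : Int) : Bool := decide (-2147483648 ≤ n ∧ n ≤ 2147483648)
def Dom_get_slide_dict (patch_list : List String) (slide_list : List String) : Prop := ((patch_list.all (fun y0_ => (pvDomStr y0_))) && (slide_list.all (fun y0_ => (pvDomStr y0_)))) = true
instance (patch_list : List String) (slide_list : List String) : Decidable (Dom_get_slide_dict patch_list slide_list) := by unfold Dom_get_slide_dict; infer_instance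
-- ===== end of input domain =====

-- B groups the patches by their '/'-prefix in ONE pass over patch_list, then walks slide_list once:
-- O(P + S) instead of A's O(P * S) rescans of patch_list for every slide name.

-- ===== PORT A =====
-- patch_name.split('/')[0]  (split with a nonempty separator never returns [], so [0] never raises)
def pvKey (patch_name : String) : String :=
  (PySem.List.pyGet? ((PySem.Str.split? patch_name "/").getD []) 0).getD ""

def get_slide_dict (patch_list : List String) (slide_list : List String) : List (String × List String) :=
  (slide_list.foldl (fun slide_dict slide_name =>
      patch_list.foldl (fun slide_dict patch_name =>
          if pvKey patch_name == slide_name then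
            -- defaultdict(list): slide_dict[slide_name].append(patch_name)
            slide_dict.modify slide_name [] (· ++ [patch_name])
          else slide_dict)
        slide_dict)
    (PySem.Dict.empty : PySem.Dict String (List String))).items

-- ===== PORT B =====
def get_slide_dict_alt (patch_list : List String) (slide_list : List String) : List (String × List String) :=
  let groups : PySem.Dict String (List String) :=
    patch_list.foldl (fun groups patch_name =>
        -- groups.setdefault(key, []).append(patch_name)
        groups.modify (pvKey patch_name) [] (· ++ [patch_name]))
      PySem.Dict.empty
  (slide_list.foldl (fun out slide_name =>
      let ps := groups.getD slide_name []
      if ps ≠ [] then out.modify slide_name [] (· ++ ps) else out)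
    (PySem.Dict.empty : PySem.Dict String (List String))).items

-- ===== PRECONDITION & SPEC =====
def Spec_get_slide_dict (patch_list : List String) (slide_list : List String) (out : List (String × List String)) : Prop := out = get_slide_dict_alt patch_list slide_list
instance (patch_list : List String) (slide_list : List String) (out : List (String × List String)) : Decidable (Spec_get_slide_dict patch_list slide_list out) := by unfold Spec_get_slide_dict; infer_instance

-- ===== CLAIM (what is proved, stated in full; the proofs are below) =====
def Claim_equal_get_slide_dict : Prop := ∀ (patch_list : List String) (slide_list : List String), Dom_get_slide_dict patch_list slide_list → Spec_get_slide_dict patch_list slide_list (get_slide_dict patch_list slide_list)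

-- ===== LEMMAS AND PROOFS =====

-- modify with default [] is insert of the extended value (definitional on items)
theorem pv_modify_eq_insert (d : PySem.Dict String (List String)) (k : String)
    (f : List String → List String) : d.modify k [] f = d.insert k (f (d.getD k [])) :=
  PySem.Dict.ext_iff.mpr rfl

-- the value B's grouping pass stores under s is exactly the patches whose key is s
theorem pv_groups_getD (patch_list : List String) (g : PySem.Dict String (List String)) (s : String) :
    (patch_list.foldl (fun groups patch_name =>
        groups.modify (pvKey patch_name) [] (· ++ [patch_name])) g).getD s []
      = g.getD s [] ++ patch_list.filter (fun p => pvKey p == s) := by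
  have h : patch_list.foldl (fun groups patch_name =>
        groups.modify (pvKey patch_name) [] (· ++ [patch_name])) g
      = (patch_list.map (fun p => (pvKey p, p))).foldl
          (fun groups q => groups.modify q.1 [] (· ++ [q.2])) g := by
    rw [List.foldl_map]
  rw [h, PySem.Dict.getD_foldl_modify_append]
  congr 1
  rw [List.filter_map, List.map_map]
  simp [Function.comp_def]

-- A's inner scan over patch_list appends, in one go, exactly the matching patches
theorem pv_pushAll (l : List String) (s : String) (d : PySem.Dict String (List String)) :
    l.foldl (fun d p => d.insert s (d.getD s [] ++ [p])) d
      = if l = [] then d else d.insert s (d.getD s [] ++ l) := by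
  induction l generalizing d with
  | nil => simp
  | cons p rest ih =>
    simp only [List.foldl_cons, ih]
    by_cases h : rest = []
    · simp [h]
    · simp [h, PySem.Dict.getD_insert_self, PySem.Dict.insert_insert_self]

theorem pv_innerA (patch_list : List String) (s : String) (d : PySem.Dict String (List String)) :
    patch_list.foldl (fun d p => if pvKey p == s then d.modify s [] (· ++ [p]) else d) d
      = (let ps := patch_list.filter (fun p => pvKey p == s);
         if ps ≠ [] then d.insert s (d.getD s [] ++ ps) else d) := by
  have h1 : patch_list.foldl (fun d p => if pvKey p == s then d.modify s [] (· ++ [p]) else d) d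
      = (patch_list.filter (fun p => pvKey p == s)).foldl
          (fun d p => d.modify s [] (· ++ [p])) d := by
    induction patch_list generalizing d with
    | nil => rfl
    | cons p rest ih =>
      by_cases h : (pvKey p == s) = true
      · simp only [List.foldl_cons, List.filter_cons, if_pos h]; exact ih _
      · simp only [List.foldl_cons, List.filter_cons, if_neg h]; exact ih _
  have h2 : ∀ d : PySem.Dict String (List String), ∀ p,
      d.modify s [] (· ++ [p]) = d.insert s (d.getD s [] ++ [p]) :=
    fun d p => pv_modify_eq_insert d s (· ++ [p])
  simp only [h1, funext fun d => funext (h2 d), pv_pushAll]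
  by_cases h : patch_list.filter (fun p => pvKey p == s) = [] <;> simp [h]

-- the two passes over slide_list agree step by step
theorem pv_fold_eq (patch_list : List String) (slide_list : List String)
    (d : PySem.Dict String (List String)) :
    slide_list.foldl (fun slide_dict slide_name =>
        patch_list.foldl (fun slide_dict patch_name =>
            if pvKey patch_name == slide_name then
              slide_dict.modify slide_name [] (· ++ [patch_name])
            else slide_dict)
          slide_dict) d
      = slide_list.foldl (fun out slide_name =>
          let ps := (patch_list.foldl (fun groups patch_name =>
              groups.modify (pvKey patch_name) [] (· ++ [patch_name])) PySem.Dict.empty).getD slide_name []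
          if ps ≠ [] then out.modify slide_name [] (· ++ ps) else out) d := by
  induction slide_list generalizing d with
  | nil => rfl
  | cons s rest ih =>
    simp only [List.foldl_cons]
    rw [pv_innerA, pv_groups_getD, PySem.Dict.getD_empty, List.nil_append]
    by_cases h : patch_list.filter (fun p => pvKey p == s) = []
    · simp only [h, ne_eq, not_true_eq_false, if_false]
      exact ih _
    · simp only [ne_eq, h, not_false_eq_true, if_pos, pv_modify_eq_insert]
      exact ih _

-- ===== VERDICT (by name: the statement is the Claim_ definition above) =====
theorem get_slide_dict_spec : Claim_equal_get_slide_dict := by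
  intro patch_list slide_list _
  exact congrArg PySem.Dict.items (pv_fold_eq patch_list slide_list PySem.Dict.empty)
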